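-- pv_equiv track=rewrite | github.com/AndreiPiterbarg/compact_sidon | cert_pipeline/kill_survivors.py | split_box_to_depth
-- ===== SOURCE A (Python) =====
-- from typing import List
--
-- class MathInsufficient(Exception):
--     """Raised when a box cannot be split further (every integer axis has
--     width <= 1, i.e. the box is a single dyadic-2^60 grid point) but
--     has not been certified.
--
--     A point box has val_B = max_W f(mu) at that point. If the cert
--     failed at that point it means f(mu) < target — so val(d) < target
--     and the proof attempt has failed by mathematical insufficiency, NOT
--     a configuration / time-budget issue. Caller must raise the dimension
--     d (or lower the target) — no amount of extra splitting will help.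
--     """
--
-- def split_box_to_depth(lo_int: List[int], hi_int: List[int],
--                         target_depth: int) -> List[tuple]:
--     """Split a box along its top-`target_depth` widest INTEGER axes,
--     bisecting each ONCE. Produces up to 2^target_depth children. Each
--     child has the chosen axes halved (integer midpoint) and other axes
--     unchanged.
--
--     WHY MULTI-AXIS (not same axis target_depth times):
--     The McCormick LP gap on a box has a term
--         scale_W * sum_{(i,j) in S_W} (hi_i - lo_i)(hi_j - lo_j)
--     per window W. Splitting only the single widest axis shrinks the gap
--     by 4x ONLY for windows whose binding (i,j) pairs include that axis;
--     other windows see no improvement. By splitting `target_depth`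
--     DIFFERENT widest axes once each, we touch many more (i,j) pairs and
--     bring the LP gap down across nearly all windows simultaneously.
--     Same child count, much faster gap reduction.
--
--     SATURATION HANDLING:
--     Only axes with integer width >= 2 are splittable on the dyadic-2^60
--     grid (a width-1 axis bisected at floor((lo+hi)/2) yields lo=mid).
--     If FEWER than `target_depth` axes are splittable we still return
--     2^k children where k = number of splittable axes (<= target_depth).
--     If ZERO axes are splittable the box is a single grid point — we
--     raise `MathInsufficient` so the caller can abort with a clean
--     "lower target / raise d" message instead of silently looping.
--     """
--     if target_depth <= 0:
--         return [(list(lo_int), list(hi_int))]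
--     # Rank axes by integer width (descending). Splittable axes have
--     # integer width >= 2.
--     widths = sorted(
--         ((hi - lo, i) for i, (lo, hi) in enumerate(zip(lo_int, hi_int))),
--         reverse=True,
--     )
--     splittable_axes: List[int] = [i for (w, i) in widths if w >= 2]
--     if not splittable_axes:
--         # Single grid point — caller should escalate (raise d / lower t).
--         raise MathInsufficient(
--             f'box is a single dyadic-2^60 grid point '
--             f'(no axis with int width >= 2). lo_int[0..3]={lo_int[:3]}'
--         )
--     pick: List[int] = splittable_axes[:target_depth]
--     # BFS-style: start with the single input box, bisect each picked
--     # axis in turn so children = 2^len(pick).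
--     children: List[tuple] = [(list(lo_int), list(hi_int))]
--     for axis in pick:
--         new_children: List[tuple] = []
--         for (clo, chi) in children:
--             mid = (clo[axis] + chi[axis]) // 2
--             # Re-check splittability for THIS specific child (axis may
--             # have been narrowed by an upstream split — possible only
--             # if the same axis appears twice in `pick`, which can't
--             # happen since splittable_axes has unique entries).
--             if mid <= clo[axis] or mid >= chi[axis]:
--                 # Conservatively keep the child unsplit on this axis
--                 # (rest of `pick` may still bisect successfully).
--                 new_children.append((clo, chi))
--                 continue
--             left_lo, left_hi = list(clo), list(chi)
--             left_hi[axis] = mid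
--             right_lo, right_hi = list(clo), list(chi)
--             right_lo[axis] = mid
--             new_children.append((left_lo, left_hi))
--             new_children.append((right_lo, right_hi))
--         children = new_children
--     return children
-- ===== SOURCE B (Python) =====
-- from typing import List
--
--
-- class MathInsufficient(Exception):
--     pass
--
--
-- def split_box_to_depth(lo_int: List[int], hi_int: List[int],
--                        target_depth: int) -> List[tuple]:
--     """Depth-first recursive subdivision: rank axes once, pick the
--     widest splittable ones, then recursively bisect each picked axis,
--     emitting children depth-first (left subtree before right)."""
--     if target_depth <= 0:
--         return [(list(lo_int), list(hi_int))]
--     n = min(len(lo_int), len(hi_int))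
--     order = sorted(range(n), key=lambda i: (hi_int[i] - lo_int[i], i),
--                    reverse=True)
--     pick = [i for i in order if hi_int[i] - lo_int[i] >= 2][:target_depth]
--     if not pick:
--         raise MathInsufficient(
--             f'box is a single dyadic-2^60 grid point '
--             f'(no axis with int width >= 2). lo_int[0..3]={lo_int[:3]}'
--         )
--
--     def subdivide(axes, lo, hi):
--         if not axes:
--             return [(lo, hi)]
--         ax, rest = axes[0], axes[1:]
--         mid = (lo[ax] + hi[ax]) // 2
--         left_hi = list(hi)
--         left_hi[ax] = mid
--         right_lo = list(lo)
--         right_lo[ax] = mid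
--         return subdivide(rest, lo, left_hi) + subdivide(rest, right_lo, hi)
--
--     return subdivide(pick, list(lo_int), list(hi_int))
-- ===== Notes on version B (the rewrite author's own statement) =====
-- stated objective: alternative
-- what changed: B ranks axis indices directly (instead of sorting (width,index) tuples built from enumerate(zip)) and replaces A's breadth-first level-doubling loop with per-child re-split guards by a guard-free depth-first recursion over the picked axes that emits children left-subtree-first.
import Mathlib
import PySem

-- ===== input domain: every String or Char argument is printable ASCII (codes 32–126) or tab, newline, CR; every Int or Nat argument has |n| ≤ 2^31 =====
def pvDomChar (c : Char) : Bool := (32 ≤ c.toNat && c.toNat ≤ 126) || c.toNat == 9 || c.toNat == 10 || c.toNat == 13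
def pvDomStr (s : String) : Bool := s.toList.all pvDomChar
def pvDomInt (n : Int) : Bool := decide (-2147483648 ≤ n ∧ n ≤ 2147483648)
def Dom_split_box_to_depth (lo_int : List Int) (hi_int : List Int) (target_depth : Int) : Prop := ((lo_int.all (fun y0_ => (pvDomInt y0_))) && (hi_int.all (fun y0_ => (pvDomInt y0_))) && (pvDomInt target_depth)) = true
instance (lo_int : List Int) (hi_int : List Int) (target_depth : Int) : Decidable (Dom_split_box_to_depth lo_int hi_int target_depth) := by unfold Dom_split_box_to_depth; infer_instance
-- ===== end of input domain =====

-- B replaces A's breadth-first level-doubling split loop (with per-child re-split guards)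
-- by a guard-free depth-first recursion over axis indices ranked directly; same return value.


-- ===== PORT A =====
-- literal port of A: sort (width, index) tuples descending, filter splittable, take
-- target_depth, then the BFS doubling loop with its per-child re-split guard.
-- On the raise MathInsufficient path (no splittable axis) the port returns [] (excluded by Pre_).
def split_box_to_depth (lo_int : List Int) (hi_int : List Int) (target_depth : Int) : List (List Int × List Int) :=
  if target_depth ≤ 0 then [(lo_int, hi_int)] else
  let widths := PySem.List.sorted2
      ((PySem.List.enumerate (lo_int.zip hi_int) 0).map (fun e => (e.2.2 - e.2.1, e.1)))
      (fun p => p.1) (fun p => p.2) true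
  let splittable_axes := (widths.filter (fun p => decide (2 ≤ p.1))).map (fun p => p.2)
  if splittable_axes = [] then []
  else
    let pick := PySem.List.slice splittable_axes none (some target_depth)
    pick.foldl (fun children axis =>
      children.foldl (fun nc c =>
        let mid := PySem.Int.floordiv (PySem.List.pyGetD c.1 axis 0 + PySem.List.pyGetD c.2 axis 0) 2
        if mid ≤ PySem.List.pyGetD c.1 axis 0 ∨ PySem.List.pyGetD c.2 axis 0 ≤ mid then
          nc ++ [(c.1, c.2)]
        else
          nc ++ [(c.1, PySem.List.pySetD c.2 axis mid), (PySem.List.pySetD c.1 axis mid, c.2)]) []) [(lo_int, hi_int)]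

-- ===== PORT B =====
-- B's recursive helper `subdivide`: bisect the first picked axis and recurse on the rest.
def splitRec (axes : List Int) (lo : List Int) (hi : List Int) : List (List Int × List Int) :=
  match axes with
  | [] => [(lo, hi)]
  | ax :: rest =>
    let mid := PySem.Int.floordiv (PySem.List.pyGetD lo ax 0 + PySem.List.pyGetD hi ax 0) 2
    splitRec rest lo (PySem.List.pySetD hi ax mid) ++ splitRec rest (PySem.List.pySetD lo ax mid) hi

def split_box_to_depth_alt (lo_int : List Int) (hi_int : List Int) (target_depth : Int) : List (List Int × List Int) :=
  if target_depth ≤ 0 then [(lo_int, hi_int)] else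
  let n := min lo_int.length hi_int.length
  let order := PySem.List.sorted2 (PySem.List.pyRange 0 (n : Int) 1)
      (fun i => PySem.List.pyGetD hi_int i 0 - PySem.List.pyGetD lo_int i 0) (fun i => i) true
  let pick := PySem.List.slice
      (order.filter (fun i => decide (2 ≤ PySem.List.pyGetD hi_int i 0 - PySem.List.pyGetD lo_int i 0)))
      none (some target_depth)
  if pick = [] then [] else splitRec pick lo_int hi_int

-- ===== PRECONDITION & SPEC =====
-- Pre_ excludes exactly the inputs where Python A raises MathInsufficient:
-- target_depth ≥ 1 while no zipped axis has integer width ≥ 2.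
def Pre_split_box_to_depth (lo_int : List Int) (hi_int : List Int) (target_depth : Int) : Prop :=
  target_depth ≤ 0 ∨ ∃ p ∈ lo_int.zip hi_int, 2 ≤ p.2 - p.1
instance (lo_int : List Int) (hi_int : List Int) (target_depth : Int) : Decidable (Pre_split_box_to_depth lo_int hi_int target_depth) := by unfold Pre_split_box_to_depth; infer_instance
def pvWitness_split_box_to_depth : List Int × List Int × Int := ([0, 1], [4, 2], 1)

def Spec_split_box_to_depth (lo_int : List Int) (hi_int : List Int) (target_depth : Int) (out : List (List Int × List Int)) : Prop := out = split_box_to_depth_alt lo_int hi_int target_depth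
instance (lo_int : List Int) (hi_int : List Int) (target_depth : Int) (out : List (List Int × List Int)) : Decidable (Spec_split_box_to_depth lo_int hi_int target_depth out) := by unfold Spec_split_box_to_depth; infer_instance

-- ===== CLAIM =====
def Claim_equal_split_box_to_depth : Prop := ∀ (lo_int : List Int) (hi_int : List Int) (target_depth : Int), Dom_split_box_to_depth lo_int hi_int target_depth → Pre_split_box_to_depth lo_int hi_int target_depth → Spec_split_box_to_depth lo_int hi_int target_depth (split_box_to_depth lo_int hi_int target_depth)

-- ===== LEMMAS AND PROOFS =====

-- insertBy commutes with mapping when the comparison only looks through the map.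
theorem pv_insertBy_map {α β : Type} (g : α → β) (bef : β → β → Bool) (x : α) (ys : List α) :
    PySem.List.insertBy bef (g x) (ys.map g)
      = (PySem.List.insertBy (fun a b => bef (g a) (g b)) x ys).map g := by
  induction ys with
  | nil => simp [PySem.List.insertBy]
  | cons y ys ih =>
    simp only [List.map_cons, PySem.List.insertBy]
    split_ifs <;> simp_all

-- foldl of insertBy commutes with mapping (the loop behind sorted2).
theorem pv_foldl_insertBy_map {α β : Type} (g : α → β) (bef : β → β → Bool)
    (xs : List α) (acc : List α) :
    (xs.map g).foldl (fun acc x => PySem.List.insertBy bef x acc) (acc.map g)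
      = (xs.foldl (fun acc x => PySem.List.insertBy (fun a b => bef (g a) (g b)) x acc) acc).map g := by
  induction xs generalizing acc with
  | nil => simp
  | cons x xs ih =>
    simp only [List.map_cons, List.foldl_cons]
    rw [pv_insertBy_map, ih]

-- sorted2 commutes with mapping when the keys factor through the map.
theorem pv_sorted2_map {α β : Type} (g : α → β) (k1 : β → Int) (k2 : β → Int)
    (xs : List α) (rev : Bool) :
    PySem.List.sorted2 (xs.map g) k1 k2 rev
      = (PySem.List.sorted2 xs (fun a => k1 (g a)) (fun a => k2 (g a)) rev).map g := by
  cases rev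
  · exact pv_foldl_insertBy_map g _ xs []
  · exact pv_foldl_insertBy_map g _ xs []

-- A's fold-of-append inner loop, as a flatMap step.
def pvExpand (axis : Int) (c : List Int × List Int) : List (List Int × List Int) :=
  let mid := PySem.Int.floordiv (PySem.List.pyGetD c.1 axis 0 + PySem.List.pyGetD c.2 axis 0) 2
  if mid ≤ PySem.List.pyGetD c.1 axis 0 ∨ PySem.List.pyGetD c.2 axis 0 ≤ mid then
    [(c.1, c.2)]
  else
    [(c.1, PySem.List.pySetD c.2 axis mid), (PySem.List.pySetD c.1 axis mid, c.2)]

theorem pv_foldl_flatMap_append (pick : List Int) (xs ys : List (List Int × List Int)) :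
    pick.foldl (fun cs ax => cs.flatMap (pvExpand ax)) (xs ++ ys)
      = pick.foldl (fun cs ax => cs.flatMap (pvExpand ax)) xs
        ++ pick.foldl (fun cs ax => cs.flatMap (pvExpand ax)) ys := by
  induction pick generalizing xs ys with
  | nil => simp
  | cons a rest ih => simp [List.flatMap_append, ih]

-- invariant: picked axes are distinct, in range, and still have width ≥ 2.
def pvInv (pick : List Int) (clo chi : List Int) : Prop :=
  pick.Nodup ∧ ∀ ax ∈ pick, 0 ≤ ax ∧ ax.toNat < clo.length ∧ ax.toNat < chi.length ∧
    2 ≤ PySem.List.pyGetD chi ax 0 - PySem.List.pyGetD clo ax 0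

theorem pv_loop_eq (pick : List Int) (clo chi : List Int) (h : pvInv pick clo chi) :
    pick.foldl (fun cs ax => cs.flatMap (pvExpand ax)) [(clo, chi)] = splitRec pick clo chi := by
  induction pick generalizing clo chi with
  | nil => simp [splitRec]
  | cons a rest ih =>
    obtain ⟨hnd, hall⟩ := h
    obtain ⟨ha0, halo, hahi, haw⟩ := hall a (by simp)
    have hmid : ¬ (PySem.Int.floordiv (PySem.List.pyGetD clo a 0 + PySem.List.pyGetD chi a 0) 2 ≤ PySem.List.pyGetD clo a 0
        ∨ PySem.List.pyGetD chi a 0 ≤ PySem.Int.floordiv (PySem.List.pyGetD clo a 0 + PySem.List.pyGetD chi a 0) 2) := by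
      rw [PySem.Int.floordiv_eq_ediv_of_pos (by omega)]
      omega
    have hexp : pvExpand a (clo, chi)
        = [(clo, PySem.List.pySetD chi a (PySem.Int.floordiv (PySem.List.pyGetD clo a 0 + PySem.List.pyGetD chi a 0) 2)),
           (PySem.List.pySetD clo a (PySem.Int.floordiv (PySem.List.pyGetD clo a 0 + PySem.List.pyGetD chi a 0) 2), chi)] := by
      simp only [pvExpand, if_neg hmid]
    have hset : ∀ (xs : List Int) (v : Int), PySem.List.pySetD xs a v = xs.set a.toNat v :=
      fun xs v => PySem.List.pySetD_of_nonneg xs v ha0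
    have hinv : ∀ (v : Int) (ax : Int), ax ∈ rest →
        PySem.List.pyGetD (PySem.List.pySetD clo a v) ax 0 = PySem.List.pyGetD clo ax 0 ∧
        PySem.List.pyGetD (PySem.List.pySetD chi a v) ax 0 = PySem.List.pyGetD chi ax 0 := by
      intro v ax hax
      obtain ⟨hx0, hxlo, hxhi, _⟩ := hall ax (by simp [hax])
      have hne : ax ≠ a := by
        intro hc; subst hc; exact (List.nodup_cons.mp hnd).1 hax
      have hne' : ax.toNat ≠ a.toNat := by omega
      refine ⟨?_, ?_⟩
      · rw [hset, PySem.List.pyGetD_eq_getElem (i := ax) (clo.set a.toNat v) 0 hx0 (by simp only [List.length_set]; omega),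
            PySem.List.pyGetD_eq_getElem (i := ax) clo 0 hx0 (by omega)]
        exact List.getElem_set_ne (by omega) _
      · rw [hset, PySem.List.pyGetD_eq_getElem (i := ax) (chi.set a.toNat v) 0 hx0 (by simp only [List.length_set]; omega),
            PySem.List.pyGetD_eq_getElem (i := ax) chi 0 hx0 (by omega)]
        exact List.getElem_set_ne (by omega) _
    simp only [List.foldl_cons, List.flatMap_cons, List.flatMap_nil, List.append_nil, hexp]
    rw [show ([(clo, PySem.List.pySetD chi a _), (PySem.List.pySetD clo a _, chi)] :
          List (List Int × List Int))
        = [(clo, PySem.List.pySetD chi a (PySem.Int.floordiv (PySem.List.pyGetD clo a 0 + PySem.List.pyGetD chi a 0) 2))]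
          ++ [(PySem.List.pySetD clo a (PySem.Int.floordiv (PySem.List.pyGetD clo a 0 + PySem.List.pyGetD chi a 0) 2), chi)] from rfl,
      pv_foldl_flatMap_append]
    rw [ih, ih, splitRec]
    · exact ⟨(List.nodup_cons.mp hnd).2, fun ax hax => by
        obtain ⟨hx0, hxlo, hxhi, hxw⟩ := hall ax (by simp [hax])
        obtain ⟨he1, he2⟩ := hinv (PySem.Int.floordiv (PySem.List.pyGetD clo a 0 + PySem.List.pyGetD chi a 0) 2) ax hax
        exact ⟨hx0, by simpa [hset] using hxlo, hxhi, by rw [he1]; omega⟩⟩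
    · exact ⟨(List.nodup_cons.mp hnd).2, fun ax hax => by
        obtain ⟨hx0, hxlo, hxhi, hxw⟩ := hall ax (by simp [hax])
        obtain ⟨he1, he2⟩ := hinv (PySem.Int.floordiv (PySem.List.pyGetD clo a 0 + PySem.List.pyGetD chi a 0) 2) ax hax
        exact ⟨hx0, hxlo, by simpa [hset] using hxhi, by rw [he2]; omega⟩⟩

-- A's inner append loop is a flatMap of pvExpand.
theorem pv_step_eq (cs : List (List Int × List Int)) (ax : Int) :
    cs.foldl (fun nc c =>
        let mid := PySem.Int.floordiv (PySem.List.pyGetD c.1 ax 0 + PySem.List.pyGetD c.2 ax 0) 2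
        if mid ≤ PySem.List.pyGetD c.1 ax 0 ∨ PySem.List.pyGetD c.2 ax 0 ≤ mid then
          nc ++ [(c.1, c.2)]
        else
          nc ++ [(c.1, PySem.List.pySetD c.2 ax mid), (PySem.List.pySetD c.1 ax mid, c.2)]) []
      = cs.flatMap (pvExpand ax) := by
  have h : (fun nc (c : List Int × List Int) =>
        let mid := PySem.Int.floordiv (PySem.List.pyGetD c.1 ax 0 + PySem.List.pyGetD c.2 ax 0) 2
        if mid ≤ PySem.List.pyGetD c.1 ax 0 ∨ PySem.List.pyGetD c.2 ax 0 ≤ mid then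
          nc ++ [(c.1, c.2)]
        else
          nc ++ [(c.1, PySem.List.pySetD c.2 ax mid), (PySem.List.pySetD c.1 ax mid, c.2)])
      = (fun nc c => nc ++ pvExpand ax c) := by
    funext nc c
    simp only [pvExpand]
    split_ifs <;> rfl
  rw [h, PySem.List.foldl_append_eq_flatMap]
  simp

theorem pv_main (lo_int hi_int : List Int) (target_depth : Int) :
    split_box_to_depth lo_int hi_int target_depth
      = split_box_to_depth_alt lo_int hi_int target_depth := by
  unfold split_box_to_depth split_box_to_depth_alt
  by_cases h0 : target_depth ≤ 0
  · simp [h0]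
  simp only [if_neg h0]
  -- abbreviations
  set n : Nat := min lo_int.length hi_int.length with hn
  set g : Int → Int × Int :=
    fun i => (PySem.List.pyGetD hi_int i 0 - PySem.List.pyGetD lo_int i 0, i) with hg
  -- the (width, index) pairs A sorts are the mapped index range B sorts
  have hpairs : (PySem.List.enumerate (lo_int.zip hi_int) 0).map (fun e => (e.2.2 - e.2.1, e.1))
      = (PySem.List.pyRange 0 (n : Int) 1).map g := by
    rw [PySem.List.enumerate_eq_map_pyRange (lo_int.zip hi_int) ((0 : Int), (0 : Int)),
        List.map_map]
    have hlen : PySem.List.len (lo_int.zip hi_int) = (n : Int) := by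
      simp [PySem.List.len, hn, List.length_zip]
    rw [hlen]
    refine List.map_congr_left ?_
    intro j hj
    obtain ⟨hj0, hjn⟩ := PySem.List.mem_pyRange_one.mp hj
    have hjn' : j.toNat < (lo_int.zip hi_int).length := by
      simp only [List.length_zip]; omega
    have hz := PySem.List.pyGetD_eq_getElem (i := j) (lo_int.zip hi_int) ((0 : Int), (0 : Int))
      hj0 (by simp only [List.length_zip]; omega)
    simp only [Function.comp_apply, hz, List.getElem_zip, hg,
      PySem.List.pyGetD_eq_getElem (i := j) lo_int 0 hj0 (by omega),
      PySem.List.pyGetD_eq_getElem (i := j) hi_int 0 hj0 (by omega)]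
  rw [hpairs, pv_sorted2_map]
  set order := PySem.List.sorted2 (PySem.List.pyRange 0 (n : Int) 1)
      (fun a => (g a).1) (fun a => (g a).2) true with horder
  rw [List.filter_map, List.map_map]
  have hcomp1 : ((fun p : Int × Int => decide (2 ≤ p.1)) ∘ g)
      = fun i => decide (2 ≤ PySem.List.pyGetD hi_int i 0 - PySem.List.pyGetD lo_int i 0) := rfl
  have hcomp2 : ((fun p : Int × Int => p.2) ∘ g) = fun i => i := rfl
  rw [hcomp1, hcomp2, List.map_id']
  set src := order.filter
      (fun i => decide (2 ≤ PySem.List.pyGetD hi_int i 0 - PySem.List.pyGetD lo_int i 0)) with hsrc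
  have hslice : PySem.List.slice src none (some target_depth) = src.take target_depth.toNat :=
    PySem.List.slice_to src (by omega)
  by_cases hempty : src = []
  · rw [hempty] at hslice
    simp [hempty, hslice]
  · have hpick_ne : ¬ (PySem.List.slice src none (some target_depth) = []) := by
      rw [hslice]
      simp only [List.take_eq_nil_iff, not_or]
      exact ⟨by omega, hempty⟩
    simp only [if_neg hempty, if_neg hpick_ne]
    have hfold : (fun (children : List (List Int × List Int)) (axis : Int) =>
        children.foldl (fun nc c =>
          let mid := PySem.Int.floordiv (PySem.List.pyGetD c.1 axis 0 + PySem.List.pyGetD c.2 axis 0) 2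
          if mid ≤ PySem.List.pyGetD c.1 axis 0 ∨ PySem.List.pyGetD c.2 axis 0 ≤ mid then
            nc ++ [(c.1, c.2)]
          else
            nc ++ [(c.1, PySem.List.pySetD c.2 axis mid), (PySem.List.pySetD c.1 axis mid, c.2)]) [])
        = fun cs ax => cs.flatMap (pvExpand ax) := by
      funext cs ax
      exact pv_step_eq cs ax
    rw [hfold]
    apply pv_loop_eq
    -- the invariant holds for the picked axes on the original box
    have hmem : ∀ ax ∈ PySem.List.slice src none (some target_depth), ax ∈ src := by
      intro ax hax
      rw [hslice] at hax
      exact List.mem_of_mem_take hax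
    have hsrc_sub : ∀ ax ∈ src, ax ∈ order ∧
        2 ≤ PySem.List.pyGetD hi_int ax 0 - PySem.List.pyGetD lo_int ax 0 := by
      intro ax hax
      have := List.mem_filter.mp hax
      exact ⟨this.1, by simpa using this.2⟩
    have hnodup : (PySem.List.slice src none (some target_depth)).Nodup := by
      rw [hslice]
      refine List.Sublist.nodup (List.take_sublist _ _) ?_
      refine List.Nodup.filter _ ?_
      exact ((PySem.List.sorted2_perm _ _ _ _).nodup_iff).mpr (PySem.List.nodup_pyRange_one 0 (n : Int))
    refine ⟨hnodup, ?_⟩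
    intro ax hax
    obtain ⟨hord, hwidth⟩ := hsrc_sub ax (hmem ax hax)
    have hrange : ax ∈ PySem.List.pyRange 0 (n : Int) 1 :=
      ((PySem.List.sorted2_perm _ _ _ _).mem_iff).mp hord
    obtain ⟨h0', hn'⟩ := PySem.List.mem_pyRange_one.mp hrange
    exact ⟨h0', by omega, by omega, hwidth⟩

-- ===== VERDICT =====
theorem split_box_to_depth_spec : Claim_equal_split_box_to_depth := by
  intro lo_int hi_int target_depth _ _
  exact pv_main lo_int hi_int target_depth
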